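-- pv_equiv track=rewrite | github.com/gabrielbmotta/aoc_2023 | day_07/ae_py/main2.py | maxMode
-- ===== SOURCE A (Python) =====
-- from collections import Counter
--
-- charMap = {'J': '1', '2': '2', '3': '3', '4': '4', '5': '5', '6': '6', '7': '7', '8': '8', '9': '9', 'T': 'A', 'Q': 'C', 'K': 'D', 'A': 'E'}
--
-- def maxMode(hand):
--     counter = Counter(hand.replace('J', ''))
--     if counter.values():
--         max_count = max(counter.values())
--         modes = [k for k, v in counter.items() if v == max_count]
--         highestCharVal = max([charMap[c] for c in modes])
--         return list(charMap.keys())[list(charMap.values()).index(highestCharVal)]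
--     else:
--         return 'A'
-- ===== SOURCE B (Python) =====
-- charMap = {'J': '1', '2': '2', '3': '3', '4': '4', '5': '5', '6': '6', '7': '7', '8': '8', '9': '9', 'T': 'A', 'Q': 'C', 'K': 'D', 'A': 'E'}
--
-- def maxMode(hand):
--     tally = {}
--     for c in hand:
--         if c != 'J':
--             v = charMap[c]
--             tally[v] = tally.get(v, 0) + 1
--     best, best_count = 'A', 0
--     for card, val in charMap.items():
--         n = tally.get(val, 0)
--         if n > 0 and n >= best_count:
--             best, best_count = card, n
--     return best
-- ===== Notes on version B (the rewrite author's own statement) =====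
-- stated objective: alternative
-- what changed: B drops the Counter and A's four-pass selection (max of counts, modes list, max of mapped values, reverse index lookup): it tallies the hand keyed by each card's charMap value in one explicit loop (raising the same KeyError on unknown cards), then scans charMap's items once in ascending value order keeping the last maximal count, so the highest-valued mode wins without any max(), filter or reverse lookup; Pre_ excludes hands with characters outside charMap's keys, on which A raises KeyError whenever such a character is among the most frequent while B's translation loop always raises there.
-- outside the precondition, e.g. on maxMode('1z4EDA734'): A returns '4', B raises KeyError
import Mathlib
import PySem

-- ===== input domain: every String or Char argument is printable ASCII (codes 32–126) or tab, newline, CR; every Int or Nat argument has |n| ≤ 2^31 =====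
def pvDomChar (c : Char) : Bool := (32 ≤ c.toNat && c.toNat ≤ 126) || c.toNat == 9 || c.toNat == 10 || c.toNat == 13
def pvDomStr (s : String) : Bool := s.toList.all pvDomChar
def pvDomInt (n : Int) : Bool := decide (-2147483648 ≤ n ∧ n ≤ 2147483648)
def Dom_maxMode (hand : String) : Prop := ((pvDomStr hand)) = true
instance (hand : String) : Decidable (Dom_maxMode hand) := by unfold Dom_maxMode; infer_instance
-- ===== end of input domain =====

-- B drops the Counter and A's four-pass selection: one explicit loop tallies the hand keyed by
-- each card's charMap value (same KeyError on unknown cards), then one scan of charMap's items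
-- in ascending value order keeps the last maximal count; objective: alternative.

-- ===== PORT A =====
-- charMap; its Python keys are 1-character strings, modelled as Char (the values stay String;
-- Python's string comparison on them is Lean's String '<').
def pvCharMap : PySem.Dict Char String :=
  PySem.Dict.mk [('J', "1"), ('2', "2"), ('3', "3"), ('4', "4"), ('5', "5"), ('6', "6"),
                 ('7', "7"), ('8', "8"), ('9', "9"), ('T', "A"), ('Q', "C"), ('K', "D"), ('A', "E")]

-- literal port of A: Counter of hand.replace('J',''); if the values are nonempty: max of
-- values, modes list comprehension, max of the charMap values of the modes, then the reverse
-- lookup list(charMap.keys())[list(charMap.values()).index(...)]; else 'A'.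
-- charMap[c] is ported as getD with an unreachable default (Pre_ excludes the KeyError hands);
-- the none branches of index?/pyGet? are Python's ValueError/IndexError (unreachable here).
def maxMode (hand : String) : String :=
  let counter := PySem.Dict.counter (PySem.Str.replace hand "J" "").toList
  if counter.values ≠ [] then
    let maxCount := (PySem.List.max? counter.values (fun v => v)).getD 0
    let modes := (counter.items.filter (fun kv => kv.2 == maxCount)).map (fun kv => kv.1)
    let highestCharVal := (PySem.List.max? (modes.map (fun c => pvCharMap.getD c "")) (fun s => s)).getD ""
    match PySem.List.index? pvCharMap.values highestCharVal with
    | none => ""      -- Python: ValueError (unreachable under Pre_)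
    | some i =>
      match PySem.List.pyGet? pvCharMap.keys (i : Int) with
      | none => ""    -- Python: IndexError (unreachable)
      | some c => String.ofList [c]
  else "A"

-- ===== PORT B =====
-- literal port of B: tally = {}; for c in hand: if c != 'J': v = charMap[c]; tally[v] = tally.get(v,0)+1;
-- then best, best_count = 'A', 0; for card, val in charMap.items(): n = tally.get(val, 0);
-- if n > 0 and n >= best_count: best, best_count = card, n; return best.
-- charMap[c] is ported as getD with an unreachable default (Pre_ excludes the KeyError hands).
def maxMode_alt (hand : String) : String :=
  let tally := hand.toList.foldl
    (fun (d : PySem.Dict String Int) c =>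
      if c == 'J' then d
      else d.insert (pvCharMap.getD c "") (d.getD (pvCharMap.getD c "") 0 + 1))
    (PySem.Dict.mk [])
  let r := pvCharMap.items.foldl
    (fun (st : Char × Int) kv =>
      let n := tally.getD kv.2 0
      if n > 0 ∧ n ≥ st.2 then (kv.1, n) else st)
    ('A', 0)
  String.ofList [r.1]

-- ===== PRECONDITION & SPEC =====
-- Pre_ excludes the hands containing a character outside charMap's keys: on those A raises
-- KeyError whenever such a character is among the most frequent (returning only accidentally
-- otherwise), and B's translation loop itself raises KeyError on any such character.
def Pre_maxMode (hand : String) : Prop :=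
  (hand.toList.all (fun c => c ∈ "J23456789TQKA".toList)) = true
instance (hand : String) : Decidable (Pre_maxMode hand) := by unfold Pre_maxMode; infer_instance

def pvWitness_maxMode : String := "32T3K"

def Spec_maxMode (hand : String) (out : String) : Prop := out = maxMode_alt hand
instance (hand : String) (out : String) : Decidable (Spec_maxMode hand out) := by unfold Spec_maxMode; infer_instance

-- ===== CLAIM (what is proved, stated in full; the proofs are below) =====
def Claim_equal_maxMode : Prop := ∀ (hand : String), Dom_maxMode hand → Pre_maxMode hand → Spec_maxMode hand (maxMode hand)

-- ===== LEMMAS AND PROOFS =====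

-- the card-value key shared by both programs
def pvVal (c : Char) : String := pvCharMap.getD c ""

-- the lexicographic "(count, mapped value) is no larger" order behind A's selection
def pvLex {α κ₁ κ₂ : Type} [LinearOrder κ₁] [LinearOrder κ₂] (k1 : α → κ₁) (k2 : α → κ₂) (a b : α) : Prop :=
  k1 a < k1 b ∨ (k1 a = k1 b ∧ k2 a ≤ k2 b)

theorem pvLex_refl {α κ₁ κ₂ : Type} [LinearOrder κ₁] [LinearOrder κ₂] (k1 : α → κ₁) (k2 : α → κ₂) (a : α) :
    pvLex k1 k2 a a := Or.inr ⟨rfl, le_refl _⟩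

theorem pvLex_trans {α κ₁ κ₂ : Type} [LinearOrder κ₁] [LinearOrder κ₂] {k1 : α → κ₁} {k2 : α → κ₂} {a b c : α}
    (h1 : pvLex k1 k2 a b) (h2 : pvLex k1 k2 b c) : pvLex k1 k2 a c := by
  rcases h1 with h1 | ⟨e1, l1⟩ <;> rcases h2 with h2 | ⟨e2, l2⟩
  · exact Or.inl (lt_trans h1 h2)
  · exact Or.inl (e2 ▸ h1)
  · exact Or.inl (e1 ▸ h2)
  · exact Or.inr ⟨e1.trans e2, le_trans l1 l2⟩

theorem pv_cond_true {α κ₁ κ₂ : Type} [LinearOrder κ₁] [LinearOrder κ₂] {k1 : α → κ₁} {k2 : α → κ₂} {a x : α}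
    (h : (decide (k1 a < k1 x) || !decide (k1 x < k1 a) && decide (k2 a < k2 x)) = true) :
    pvLex k1 k2 a x := by
  simp only [Bool.or_eq_true, Bool.and_eq_true, Bool.not_eq_true', decide_eq_true_eq, decide_eq_false_iff_not] at h
  rcases h with h | ⟨h1, h2⟩
  · exact Or.inl h
  · rcases lt_trichotomy (k1 a) (k1 x) with h' | h' | h'
    · exact Or.inl h'
    · exact Or.inr ⟨h', le_of_lt h2⟩
    · exact absurd h' h1

theorem pv_cond_false {α κ₁ κ₂ : Type} [LinearOrder κ₁] [LinearOrder κ₂] {k1 : α → κ₁} {k2 : α → κ₂} {a x : α}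
    (h : (decide (k1 a < k1 x) || !decide (k1 x < k1 a) && decide (k2 a < k2 x)) = false) :
    pvLex k1 k2 x a := by
  simp only [Bool.or_eq_false_iff, Bool.and_eq_false_iff, Bool.not_eq_false', decide_eq_true_eq, decide_eq_false_iff_not] at h
  obtain ⟨h1, h2⟩ := h
  rcases h2 with h2 | h2
  · exact Or.inl h2
  · rcases lt_trichotomy (k1 x) (k1 a) with h' | h' | h'
    · exact Or.inl h'
    · exact Or.inr ⟨h', le_of_not_gt h2⟩
    · exact absurd h' h1

-- invariant of max2?'s fold: the result is an element and a lexicographic upper bound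
theorem pv_max2?_foldl {α κ₁ κ₂ : Type} [LinearOrder κ₁] [LinearOrder κ₂]
    (xs : List α) (k1 : α → κ₁) (k2 : α → κ₂) (a : α) :
    ∃ m, List.foldl
      (fun acc x =>
        match acc with
        | none => some x
        | some m => if (decide (k1 m < k1 x) || !decide (k1 x < k1 m) && decide (k2 m < k2 x)) = true then some x else some m)
      (some a) xs = some m ∧ (m = a ∨ m ∈ xs) ∧ pvLex k1 k2 a m ∧
      ∀ y ∈ xs, pvLex k1 k2 y m := by
  induction xs generalizing a with
  | nil => exact ⟨a, rfl, Or.inl rfl, pvLex_refl k1 k2 a, by simp⟩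
  | cons x t ih =>
    simp only [List.foldl_cons]
    rcases hc : (decide (k1 a < k1 x) || !decide (k1 x < k1 a) && decide (k2 a < k2 x)) with _ | _
    · obtain ⟨m, hm, hmem, hax, hall⟩ := ih a
      simp only [Bool.false_eq_true, if_false]
      refine ⟨m, hm, ?_, hax, ?_⟩
      · rcases hmem with h|h
        · exact Or.inl h
        · exact Or.inr (List.mem_cons_of_mem _ h)
      · intro y hy
        rcases List.mem_cons.mp hy with h|h
        · exact h ▸ pvLex_trans (pv_cond_false hc) hax
        · exact hall y h
    · obtain ⟨m, hm, hmem, hax, hall⟩ := ih x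
      simp only [if_pos]
      refine ⟨m, hm, ?_, pvLex_trans (pv_cond_true hc) hax, ?_⟩
      · rcases hmem with h|h
        · exact Or.inr (h ▸ List.mem_cons_self)
        · exact Or.inr (List.mem_cons_of_mem _ h)
      · intro y hy
        rcases List.mem_cons.mp hy with h|h
        · exact h ▸ hax
        · exact hall y h

theorem pv_max2?_spec {α κ₁ κ₂ : Type} [LinearOrder κ₁] [LinearOrder κ₂]
    (x : α) (t : List α) (k1 : α → κ₁) (k2 : α → κ₂) :
    ∃ m, PySem.List.max2? (x :: t) k1 k2 = some m ∧ m ∈ (x :: t) ∧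
      ∀ y ∈ (x :: t), pvLex k1 k2 y m := by
  obtain ⟨m, hm, hmem, hax, hall⟩ := pv_max2?_foldl t k1 k2 x
  refine ⟨m, ?_, ?_, ?_⟩
  · simpa [PySem.List.max2?] using hm
  · rcases hmem with h|h
    · exact h ▸ List.mem_cons_self
    · exact List.mem_cons_of_mem _ h
  · intro y hy
    rcases List.mem_cons.mp hy with h|h
    · exact h ▸ hax
    · exact hall y h

-- membership through replace(hand, 'J', ''): every surviving character came from the source
theorem pv_mem_replace_go (a : Char) (fuel : Nat) (l acc : List Char) (c : Char)
    (h : c ∈ PySem.Chars.replace.go [a] [] fuel l acc) : c ∈ l ∨ c ∈ acc := by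
  induction fuel generalizing l acc with
  | zero =>
    rw [PySem.Chars.replace.go] at h
    rcases List.mem_append.mp h with h|h
    · exact Or.inr (List.mem_reverse.mp h)
    · exact Or.inl h
  | succ n ih =>
    match l with
    | [] =>
      rw [PySem.Chars.replace.go] at h
      · exact Or.inr (List.mem_reverse.mp h)
      · omega
    | x :: t =>
      rw [PySem.Chars.replace.go] at h
      by_cases hp : List.isPrefixOf [a] (x :: t)
      · simp only [hp, if_pos, List.reverse_nil, List.nil_append] at h
        rcases ih _ _ h with h'|h'
        · exact Or.inl (List.mem_cons_of_mem _ (by simpa using h'))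
        · exact Or.inr h'
      · simp only [hp, Bool.false_eq_true, if_false] at h
        rcases ih _ _ h with h'|h'
        · exact Or.inl (List.mem_cons_of_mem _ h')
        · rcases List.mem_cons.mp h' with h''|h''
          · exact Or.inl (h'' ▸ List.mem_cons_self)
          · exact Or.inr h''

theorem pv_mem_replace (l : List Char) (c : Char)
    (h : c ∈ PySem.Chars.replace l ['J'] []) : c ∈ l := by
  rw [PySem.Chars.replace] at h
  simp only [List.isEmpty_cons, Bool.false_eq_true, if_false] at h
  rcases pv_mem_replace_go 'J' l.length l [] c h with h'|h'
  · exact h'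
  · simp at h'

-- replace(hand, 'J', '') keeps the count of every character other than 'J'
theorem pv_count_replace_go (fuel : Nat) (l acc : List Char) (c : Char) (hc : c ≠ 'J') :
    (PySem.Chars.replace.go ['J'] [] fuel l acc).count c = l.count c + acc.count c := by
  induction fuel generalizing l acc with
  | zero =>
    rw [PySem.Chars.replace.go]
    simp [List.count_append, Nat.add_comm]
  | succ n ih =>
    match l with
    | [] =>
      rw [PySem.Chars.replace.go]
      · simp
      · omega
    | x :: t =>
      rw [PySem.Chars.replace.go]
      by_cases hp : List.isPrefixOf ['J'] (x :: t)
      · have hx : x = 'J' := by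
          have h' := hp
          simp only [List.isPrefixOf, Bool.and_true, beq_iff_eq] at h'
          exact h'.symm
        simp only [hp, if_pos, List.reverse_nil, List.nil_append, List.length_cons,
          List.length_nil, List.drop_succ_cons, List.drop_zero]
        rw [ih]
        subst hx
        rw [List.count_cons_of_ne (Ne.symm hc)]
      · have hx : x ≠ 'J' := by
          intro h; apply hp; subst h; simp [List.isPrefixOf]
        simp only [hp, Bool.false_eq_true, if_false]
        rw [ih]
        simp [List.count_cons]
        omega

theorem pv_count_replace (l : List Char) (c : Char) (hc : c ≠ 'J') :
    (PySem.Chars.replace l ['J'] []).count c = l.count c := by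
  rw [PySem.Chars.replace]
  simp only [List.isEmpty_cons, Bool.false_eq_true, if_false]
  rw [pv_count_replace_go l.length l [] c hc]
  simp

-- 'J' itself does not survive replace(hand, 'J', '')
theorem pv_J_not_mem_replace_go (fuel : Nat) (l acc : List Char)
    (hfuel : l.length ≤ fuel) (hacc : 'J' ∉ acc) :
    'J' ∉ PySem.Chars.replace.go ['J'] [] fuel l acc := by
  induction fuel generalizing l acc with
  | zero =>
    rw [PySem.Chars.replace.go]
    have : l = [] := List.length_eq_zero_iff.mp (Nat.le_zero.mp hfuel)
    subst this
    simpa using fun h => hacc (List.mem_reverse.mp h)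
  | succ n ih =>
    match l with
    | [] =>
      rw [PySem.Chars.replace.go]
      · simpa using fun h => hacc (List.mem_reverse.mp h)
      · omega
    | x :: t =>
      rw [PySem.Chars.replace.go]
      by_cases hp : List.isPrefixOf ['J'] (x :: t)
      · simp only [hp, if_pos, List.reverse_nil, List.nil_append, List.length_cons,
          List.length_nil, List.drop_succ_cons, List.drop_zero]
        exact ih t acc (by simpa using Nat.le_of_succ_le_succ hfuel) hacc
      · have hx : x ≠ 'J' := by
          intro h; apply hp; subst h; simp [List.isPrefixOf]
        simp only [hp, Bool.false_eq_true, if_false]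
        refine ih t (x :: acc) (by simpa using Nat.le_of_succ_le_succ hfuel) ?_
        intro h
        rcases List.mem_cons.mp h with h|h
        · exact hx h.symm
        · exact hacc h

theorem pv_J_not_mem_replace (l : List Char) : 'J' ∉ PySem.Chars.replace l ['J'] [] := by
  rw [PySem.Chars.replace]
  simp only [List.isEmpty_cons, Bool.false_eq_true, if_false]
  exact pv_J_not_mem_replace_go l.length l [] (le_refl _) (by simp)

theorem pv_key_mem (c : Char) (hc : c ∈ "J23456789TQKA".toList) : c ∈ pvCharMap.keys := by
  simp only [show "J23456789TQKA".toList = ['J','2','3','4','5','6','7','8','9','T','Q','K','A'] from rfl,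
             List.mem_cons, List.not_mem_nil, or_false] at hc
  rcases hc with h|h|h|h|h|h|h|h|h|h|h|h|h <;> subst h <;> decide

-- A's reverse lookup undoes charMap on each of its 13 keys
theorem pv_rlookup (c : Char) (hc : c ∈ pvCharMap.keys) :
    (match PySem.List.index? pvCharMap.values (pvCharMap.getD c "") with
     | none => ""
     | some i =>
       match PySem.List.pyGet? pvCharMap.keys (i : Int) with
       | none => ""
       | some c' => String.ofList [c']) = String.ofList [c] := by
  simp only [show pvCharMap.keys = ['J','2','3','4','5','6','7','8','9','T','Q','K','A'] from rfl,
             List.mem_cons, List.not_mem_nil, or_false] at hc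
  rcases hc with h|h|h|h|h|h|h|h|h|h|h|h|h <;> subst h <;> decide

-- the heart of A's side: on any counter whose keys are charMap keys, A's four-pass
-- selection equals a single lexicographic argmax over the counter's items
theorem pv_core (d : PySem.Dict Char Int)
    (hmodes : ∀ kv ∈ d.items, (∀ kv' ∈ d.items, kv'.2 ≤ kv.2) → kv.1 ∈ pvCharMap.keys) :
    (if d.values ≠ [] then
       (match PySem.List.index?
          pvCharMap.values
          ((PySem.List.max?
             (((d.items.filter (fun kv => kv.2 == (PySem.List.max? d.values (fun v => v)).getD 0)).map (fun kv => kv.1)).map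
                (fun c => pvCharMap.getD c ""))
             (fun s => s)).getD "") with
        | none => ""
        | some i =>
          match PySem.List.pyGet? pvCharMap.keys (i : Int) with
          | none => ""
          | some c => String.ofList [c])
     else "A")
  = (if d.items = [] then "A"
     else
       match PySem.List.max2? d.items (fun kv => kv.2) (fun kv => pvCharMap.getD kv.1 "") with
       | some best => String.ofList [best.1]
       | none => "A") := by
  obtain ⟨L⟩ := d
  simp only [show ∀ L' : List (Char × Int), (PySem.Dict.mk L').values = L'.map (fun kv => kv.2) from fun _ => rfl] at *
  cases L with
  | nil => simp
  | cons p t =>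
    rw [if_pos (by simp : List.map (fun kv => kv.2) (p :: t) ≠ []), if_neg (by simp : ¬(p :: t = []))]
    -- argmax side: it exists and is a lexicographic maximum
    obtain ⟨b, hbeq, hbmem, hbmax⟩ := pv_max2?_spec p t (fun kv => kv.2) (fun kv => pvCharMap.getD kv.1 "")
    rw [hbeq]
    -- A side: max_count
    rcases hm : PySem.List.max? ((p :: t).map (fun kv => kv.2)) (fun v => v) with _ | m0
    · exact absurd (PySem.List.max?_eq_none_iff _ _ |>.mp hm) (by simp)
    have hm0mem : m0 ∈ (p :: t).map (fun kv => kv.2) := PySem.List.max?_mem hm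
    have hm0max : ∀ v ∈ (p :: t).map (fun kv => kv.2), v ≤ m0 := by
      intro v hv; exact PySem.List.max?_isMax hm v hv
    obtain ⟨kv0, hkv0mem, hkv0v⟩ := List.mem_map.mp hm0mem
    -- the modes list is nonempty
    have hkv0modes : kv0 ∈ (p :: t).filter (fun kv => kv.2 == m0) := by
      rw [List.mem_filter]
      exact ⟨hkv0mem, by simp [hkv0v]⟩
    rw [hm]
    simp only [Option.getD_some]
    -- A side: highestCharVal
    rcases hh : PySem.List.max?
        ((((p :: t).filter (fun kv => kv.2 == m0)).map (fun kv => kv.1)).map (fun c => pvCharMap.getD c ""))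
        (fun s => s) with _ | h
    · rw [PySem.List.max?_eq_none_iff] at hh
      simp only [List.map_eq_nil_iff] at hh
      rw [hh] at hkv0modes
      exact absurd hkv0modes (List.not_mem_nil)
    have hhmem := PySem.List.max?_mem hh
    have hhmax : ∀ s ∈ (((p :: t).filter (fun kv => kv.2 == m0)).map (fun kv => kv.1)).map (fun c => pvCharMap.getD c ""), s ≤ h := by
      intro s hs; exact PySem.List.max?_isMax hh s hs
    rw [List.map_map] at hhmem hhmax
    obtain ⟨kvs, hkvsmem, hkvsval⟩ := List.mem_map.mp hhmem
    have hkvsL : kvs ∈ p :: t := (List.mem_filter.mp hkvsmem).1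
    have hkvsm0 : kvs.2 = m0 := by
      have := (List.mem_filter.mp hkvsmem).2
      simpa using this
    -- b's count is maximal, hence equals max_count, and its mapped value equals highestCharVal
    have hb2le : b.2 ≤ m0 := hm0max b.2 (by
      rw [show ((p :: t).map (fun kv => kv.2)) = List.map (fun kv => kv.2) (p :: t) from rfl]
      exact List.mem_map_of_mem hbmem)
    have hlex := hbmax kvs hkvsL
    rcases hlex with hlt | ⟨heq, hle⟩
    · have hlt' : m0 < b.2 := by simpa [hkvsm0] using hlt
      exact absurd (lt_of_lt_of_le hlt' hb2le) (lt_irrefl m0)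
    have hb2 : b.2 = m0 := by simpa [hkvsm0] using heq.symm
    have hbmodes : b ∈ (p :: t).filter (fun kv => kv.2 == m0) := by
      rw [List.mem_filter]
      exact ⟨hbmem, by simp [hb2]⟩
    have hble : pvCharMap.getD b.1 "" ≤ h := by
      apply hhmax
      exact List.mem_map.mpr ⟨b, hbmodes, rfl⟩
    have hge : h ≤ pvCharMap.getD b.1 "" := by
      rw [← hkvsval]
      simpa using hle
    have hfin : h = pvCharMap.getD b.1 "" := le_antisymm hge hble
    rw [hh]
    simp only [Option.getD_some]
    rw [hfin]
    refine pv_rlookup b.1 (hmodes b hbmem ?_)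
    intro kv' hkv'
    rcases hbmax kv' hkv' with h'|⟨h', _⟩
    · exact le_of_lt h'
    · exact le_of_eq h'

-- charMap's items, spelt out (items is the underlying association list)
theorem pv_items_lit : pvCharMap.items
    = [('J', "1"), ('2', "2"), ('3', "3"), ('4', "4"), ('5', "5"), ('6', "6"),
       ('7', "7"), ('8', "8"), ('9', "9"), ('T', "A"), ('Q', "C"), ('K', "D"), ('A', "E")] := rfl

-- charMap's items are strictly ascending in their value strings
theorem pv_items_sorted : List.Pairwise (fun a c : Char × String => a.2 < c.2) pvCharMap.items := by
  have h : List.Pairwise (fun a c : Char × String => a.2.toList < c.2.toList) pvCharMap.items := by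
    rw [pv_items_lit]; decide
  exact h.imp (fun h' => String.lt_iff_toList_lt.mpr h')

-- each item's value is pvVal of its key
theorem pv_items_val : ∀ kv ∈ pvCharMap.items, kv.2 = pvVal kv.1 := by
  intro kv hkv
  rw [pv_items_lit] at hkv
  simp only [List.mem_cons, List.not_mem_nil, or_false] at hkv
  rcases hkv with h|h|h|h|h|h|h|h|h|h|h|h|h <;> subst h <;> rfl

-- item keys are charMap keys
theorem pv_items_key : ∀ kv ∈ pvCharMap.items, kv.1 ∈ pvCharMap.keys := by
  intro kv hkv
  rw [pv_items_lit] at hkv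
  simp only [List.mem_cons, List.not_mem_nil, or_false] at hkv
  rcases hkv with h|h|h|h|h|h|h|h|h|h|h|h|h <;> subst h <;> decide

-- every charMap key occurs with its value among the items
theorem pv_item_of_key : ∀ k ∈ pvCharMap.keys, (k, pvVal k) ∈ pvCharMap.items := by
  intro k hk
  simp only [show pvCharMap.keys = ['J','2','3','4','5','6','7','8','9','T','Q','K','A'] from rfl,
             List.mem_cons, List.not_mem_nil, or_false] at hk
  rcases hk with h|h|h|h|h|h|h|h|h|h|h|h|h <;> subst h <;> decide

-- pvVal is injective on charMap's keys
theorem pv_val_inj : ∀ a ∈ pvCharMap.keys, ∀ c ∈ pvCharMap.keys, pvVal a = pvVal c → a = c := by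
  intro a ha c hc
  simp only [show pvCharMap.keys = ['J','2','3','4','5','6','7','8','9','T','Q','K','A'] from rfl,
             List.mem_cons, List.not_mem_nil, or_false] at ha hc
  rcases ha with h|h|h|h|h|h|h|h|h|h|h|h|h <;> subst h <;>
    rcases hc with h|h|h|h|h|h|h|h|h|h|h|h|h <;> subst h <;>
      intro he <;> first | rfl | exact absurd he (by decide)

-- hence the Boolean translation test coincides with the key test, for keys
theorem pv_m_inj (c : Char) (hc : c ∈ pvCharMap.keys) (k : Char) (hk : k ∈ pvCharMap.keys) :
    ((pvCharMap.getD c "" == pvCharMap.getD k "") : Bool) = (c == k) := by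
  by_cases h : c = k
  · subst h; simp
  · have h2 : pvCharMap.getD c "" ≠ pvCharMap.getD k "" := by
      intro he
      exact h (pv_val_inj c hc k hk he)
    simp [h, h2]

-- B's tally loop is the insertion-counting fold over the translated non-J characters
theorem pv_tally_fold (l : List Char) (d : PySem.Dict String Int) :
    l.foldl
      (fun (d : PySem.Dict String Int) c =>
        if c == 'J' then d
        else d.insert (pvCharMap.getD c "") (d.getD (pvCharMap.getD c "") 0 + 1)) d
    = ((l.filter (fun c => !(c == 'J'))).map (fun c => pvCharMap.getD c "")).foldl
        (fun (d : PySem.Dict String Int) x => d.insert x (d.getD x 0 + 1)) d := by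
  induction l generalizing d with
  | nil => rfl
  | cons c t ih =>
    rw [List.foldl_cons, List.filter_cons]
    by_cases h : c = 'J'
    · subst h
      rw [show (if (('J' : Char) == 'J') = true then d
            else d.insert (pvCharMap.getD 'J' "") (d.getD (pvCharMap.getD 'J' "") 0 + 1)) = d from if_pos rfl,
          show (if (!(('J' : Char) == 'J')) = true then 'J' :: List.filter (fun c => !(c == 'J')) t
            else List.filter (fun c => !(c == 'J')) t) = List.filter (fun c => !(c == 'J')) t from if_neg (by simp)]
      exact ih d
    · rw [show (if ((c : Char) == 'J') = true then d
            else d.insert (pvCharMap.getD c "") (d.getD (pvCharMap.getD c "") 0 + 1))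
            = d.insert (pvCharMap.getD c "") (d.getD (pvCharMap.getD c "") 0 + 1) from if_neg (by simp [h]),
          show (if (!((c : Char) == 'J')) = true then c :: List.filter (fun c => !(c == 'J')) t
            else List.filter (fun c => !(c == 'J')) t) = c :: List.filter (fun c => !(c == 'J')) t from if_pos (by simp [h]),
          List.map_cons, List.foldl_cons]
      exact ih _

theorem pv_tally_getD (l : List Char) (v : String) :
    (l.foldl
      (fun (d : PySem.Dict String Int) c =>
        if c == 'J' then d
        else d.insert (pvCharMap.getD c "") (d.getD (pvCharMap.getD c "") 0 + 1))
      (PySem.Dict.mk [])).getD v 0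
    = (((l.filter (fun c => !(c == 'J'))).map (fun c => pvCharMap.getD c "")).count v : Int) := by
  rw [pv_tally_fold]
  rw [PySem.Dict.getD_foldl_insert_add_one]
  rw [show (PySem.Dict.mk ([] : List (String × Int))).getD v 0 = 0 from rfl]
  omega

-- B's scan invariant: over any value-ascending item list the fold keeps the running maximal
-- positive count and the last (hence highest-valued) item achieving it
theorem pv_scan2 (f : Char × String → Int) (xs : List (Char × String)) :
    ∀ (b : Char) (n : Int),
    List.Pairwise (fun a c : Char × String => a.2 < c.2) xs →
    0 ≤ n →
    ((xs.foldl (fun (st : Char × Int) kv => if f kv > 0 ∧ f kv ≥ st.2 then (kv.1, f kv) else st) (b, n) = (b, n)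
        ∧ ∀ kv ∈ xs, f kv ≤ 0 ∨ f kv < n) ∨
      (∃ kv1 ∈ xs,
        xs.foldl (fun (st : Char × Int) kv => if f kv > 0 ∧ f kv ≥ st.2 then (kv.1, f kv) else st) (b, n) = (kv1.1, f kv1)
          ∧ 0 < f kv1 ∧ n ≤ f kv1
          ∧ ∀ kv' ∈ xs, f kv' = f kv1 → 0 < f kv' → kv'.2 ≤ kv1.2)) ∧
    n ≤ (xs.foldl (fun (st : Char × Int) kv => if f kv > 0 ∧ f kv ≥ st.2 then (kv.1, f kv) else st) (b, n)).2 ∧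
    (∀ kv ∈ xs, f kv ≤ (xs.foldl (fun (st : Char × Int) kv => if f kv > 0 ∧ f kv ≥ st.2 then (kv.1, f kv) else st) (b, n)).2) := by
  induction xs with
  | nil =>
    intro b n _ _
    exact ⟨Or.inl ⟨rfl, by simp⟩, le_refl _, by simp⟩
  | cons kv0 t ih =>
    intro b n hs hn
    have h0t : ∀ kv ∈ t, kv0.2 < kv.2 := fun kv h => (List.pairwise_cons.mp hs).1 kv h
    have hts := (List.pairwise_cons.mp hs).2
    simp only [List.foldl_cons]
    by_cases h : f kv0 > 0 ∧ f kv0 ≥ n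
    · rw [if_pos h]
      obtain ⟨hd, hle, hmax⟩ := ih kv0.1 (f kv0) hts (le_of_lt h.1)
      refine ⟨?_, le_trans h.2 hle, ?_⟩
      · rcases hd with ⟨heq, hall⟩ | ⟨kv1, hkv1, heq, hpos, hge, htie⟩
        · refine Or.inr ⟨kv0, List.mem_cons_self, heq, h.1, h.2, ?_⟩
          intro kv' hkv' he hp
          rcases List.mem_cons.mp hkv' with h'|h'
          · exact le_of_eq (by rw [h'])
          · rcases hall kv' h' with h''|h''
            · omega
            · omega
        · refine Or.inr ⟨kv1, List.mem_cons_of_mem _ hkv1, heq, hpos, le_trans h.2 hge, ?_⟩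
          intro kv' hkv' he hp
          rcases List.mem_cons.mp hkv' with h'|h'
          · rw [h']
            exact le_of_lt (h0t kv1 hkv1)
          · exact htie kv' h' he hp
      · intro kv hkv
        rcases List.mem_cons.mp hkv with h'|h'
        · exact h' ▸ hle
        · exact hmax kv h'
    · rw [if_neg h]
      rw [not_and_or, not_lt, not_le] at h
      obtain ⟨hd, hle, hmax⟩ := ih b n hts hn
      refine ⟨?_, hle, ?_⟩
      · rcases hd with ⟨heq, hall⟩ | ⟨kv1, hkv1, heq, hpos, hge, htie⟩
        · refine Or.inl ⟨heq, ?_⟩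
          intro kv hkv
          rcases List.mem_cons.mp hkv with h'|h'
          · rw [h']
            exact h
          · exact hall kv h'
        · refine Or.inr ⟨kv1, List.mem_cons_of_mem _ hkv1, heq, hpos, hge, ?_⟩
          intro kv' hkv' he hp
          rcases List.mem_cons.mp hkv' with h'|h'
          · rw [h']
            exact le_of_lt (h0t kv1 hkv1)
          · exact htie kv' h' he hp
      · intro kv hkv
        rcases List.mem_cons.mp hkv with h'|h'
        · rw [h']
          rcases h with h|h <;> omega
        · exact hmax kv h'

-- the equivalence over an arbitrary replaced character list and per-item count function
theorem pv_main (l : List Char) (f : Char × String → Int)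
    (hkeys : ∀ kv ∈ (PySem.Dict.counter l).items, kv.1 ∈ pvCharMap.keys)
    (hf : ∀ kv ∈ pvCharMap.items, f kv = (l.count kv.1 : Int)) :
    (if (PySem.Dict.counter l).values ≠ [] then
       (match PySem.List.index?
          pvCharMap.values
          ((PySem.List.max?
             ((((PySem.Dict.counter l).items.filter (fun kv => kv.2 == (PySem.List.max? (PySem.Dict.counter l).values (fun v => v)).getD 0)).map (fun kv => kv.1)).map
                (fun c => pvCharMap.getD c ""))
             (fun s => s)).getD "") with
        | none => ""
        | some i =>
          match PySem.List.pyGet? pvCharMap.keys (i : Int) with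
          | none => ""
          | some c => String.ofList [c])
     else "A")
    = String.ofList [(pvCharMap.items.foldl
        (fun (st : Char × Int) kv => if f kv > 0 ∧ f kv ≥ st.2 then (kv.1, f kv) else st) ('A', 0)).1] := by
  rw [pv_core (PySem.Dict.counter l) (fun kv hkv _ => hkeys kv hkv)]
  obtain ⟨hdisj, hle0, hmax⟩ := pv_scan2 f pvCharMap.items 'A' 0 pv_items_sorted (le_refl 0)
  set r := pvCharMap.items.foldl
      (fun (st : Char × Int) kv => if f kv > 0 ∧ f kv ≥ st.2 then (kv.1, f kv) else st) ('A', 0) with hrdef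
  rcases hitems : (PySem.Dict.counter l).items with _ | ⟨p, t⟩
  · -- empty counter: l = [], every count is 0, the scan never moves off ('A', 0)
    have hlnil : l = [] := by
      by_contra hne
      obtain ⟨x, hx⟩ := List.exists_mem_of_ne_nil l hne
      have : (x, (l.count x : Int)) ∈ (PySem.Dict.counter l).items := by
        rw [PySem.Dict.items_counter]
        exact List.mem_map.mpr ⟨x, (PySem.Set.mem_ofList _ _).mpr hx, rfl⟩
      rw [hitems] at this
      exact absurd this (List.not_mem_nil)
    have hr0 : r = ('A', 0) := by
      rcases hdisj with ⟨h, _⟩ | ⟨kv1, hkv1, _, hpos, _, _⟩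
      · exact h
      · exfalso
        have := hf kv1 hkv1
        rw [hlnil] at this
        simp at this
        omega
    rw [if_pos rfl, hr0]
  · -- nonempty counter: A's argmax and B's scan pick the same card
    rw [if_neg (by simp)]
    obtain ⟨bsel, hbeq, hbmem, hbmax⟩ :=
      pv_max2?_spec p t (fun kv : Char × Int => kv.2) (fun kv => pvCharMap.getD kv.1 "")
    rw [← hitems] at hbmem hbmax
    rw [hbeq]
    -- facts about bsel
    obtain ⟨k0, hk0mem, hk0eq⟩ := List.mem_map.mp (by
      rw [PySem.Dict.items_counter] at hbmem; exact hbmem)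
    have hbsel1 : bsel.1 = k0 := by rw [← hk0eq]
    have hbsel2 : bsel.2 = (l.count k0 : Int) := by rw [← hk0eq]
    have hk0l : k0 ∈ l := (PySem.Set.mem_ofList _ _).mp hk0mem
    have hk0keys : k0 ∈ pvCharMap.keys := by
      have := hkeys bsel hbmem
      rwa [hbsel1] at this
    have hk0pos : 0 < l.count k0 := List.count_pos_iff.mpr hk0l
    -- bsel's charMap item
    have hkv0 : (k0, pvVal k0) ∈ pvCharMap.items := pv_item_of_key k0 hk0keys
    have hfkv0 : f (k0, pvVal k0) = (l.count k0 : Int) := hf _ hkv0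
    have hfkv0pos : 0 < f (k0, pvVal k0) := by rw [hfkv0]; exact_mod_cast hk0pos
    -- the scan cannot have stayed at ('A', 0)
    rcases hdisj with ⟨_, hall⟩ | ⟨kv1, hkv1, heq, hpos, _, htie⟩
    · exfalso
      rcases hall _ hkv0 with h'|h' <;> omega
    -- r = (kv1.1, f kv1) with f kv1 the maximal count
    have hr2 : r.2 = f kv1 := by rw [heq]
    have hr1 : r.1 = kv1.1 := by rw [heq]
    have hfkv1 : f kv1 = (l.count kv1.1 : Int) := hf kv1 hkv1
    have hkv1pos : 0 < l.count kv1.1 := by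
      have : (0 : Int) < (l.count kv1.1 : Int) := by rw [← hfkv1]; exact hpos
      exact_mod_cast this
    have hkv1l : kv1.1 ∈ l := List.count_pos_iff.mp hkv1pos
    have hritem : (kv1.1, (l.count kv1.1 : Int)) ∈ (PySem.Dict.counter l).items := by
      rw [PySem.Dict.items_counter]
      exact List.mem_map.mpr ⟨kv1.1, (PySem.Set.mem_ofList _ _).mpr hkv1l, rfl⟩
    -- counts agree: f kv1 = bsel.2
    have hle1 : (l.count kv1.1 : Int) ≤ bsel.2 := by
      rcases hbmax _ hritem with h'|⟨h', _⟩
      · exact le_of_lt h'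
      · exact le_of_eq h'
    have hge1 : bsel.2 ≤ f kv1 := by
      have := hmax _ hkv0
      rw [hfkv0] at this
      rw [hbsel2, hr2] at *
      omega
    have hcounts : f kv1 = bsel.2 := by
      rw [hfkv1]
      omega
    -- values agree both ways, hence the keys are equal
    have hvle1 : pvVal kv1.1 ≤ pvVal bsel.1 := by
      rcases hbmax _ hritem with h'|⟨_, h'⟩
      · exfalso
        have : (l.count kv1.1 : Int) < bsel.2 := h'
        omega
      · exact h'
    have hvle2 : pvVal bsel.1 ≤ pvVal kv1.1 := by
      have := htie (k0, pvVal k0) hkv0 (by omega) hfkv0pos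
      rw [pv_items_val kv1 hkv1] at this
      rw [hbsel1]
      exact this
    have hkv1keys : kv1.1 ∈ pvCharMap.keys := pv_items_key kv1 hkv1
    have hfin : kv1.1 = bsel.1 := by
      rw [hbsel1]
      apply pv_val_inj kv1.1 hkv1keys k0 hk0keys
      rw [show pvVal k0 = pvVal bsel.1 from by rw [hbsel1]]
      exact le_antisymm hvle1 hvle2
    rw [hr1, hfin]

-- ===== VERDICT (by name: the statement is the Claim_ definition above) =====
theorem maxMode_spec : Claim_equal_maxMode := by
  intro hand _ hpre
  show maxMode hand = maxMode_alt hand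
  have hrl : (PySem.Str.replace hand "J" "").toList
      = PySem.Chars.replace hand.toList ['J'] [] := by
    simp [PySem.Str.toList_replace]
  have hnoJ : 'J' ∉ (PySem.Str.replace hand "J" "").toList := by
    rw [hrl]; exact pv_J_not_mem_replace hand.toList
  have hhand : ∀ c ∈ hand.toList, c ∈ pvCharMap.keys := by
    intro c hc
    rw [Pre_maxMode, List.all_eq_true] at hpre
    exact pv_key_mem c (of_decide_eq_true (hpre c hc))
  have hkeys : ∀ kv ∈ (PySem.Dict.counter (PySem.Str.replace hand "J" "").toList).items,
      kv.1 ∈ pvCharMap.keys := by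
    intro kv hkv
    rw [PySem.Dict.items_counter] at hkv
    obtain ⟨k, hk, hkeq⟩ := List.mem_map.mp hkv
    have hk1 : kv.1 = k := by rw [← hkeq]
    rw [hk1]
    apply hhand
    rw [hrl] at hk
    exact pv_mem_replace hand.toList k ((PySem.Set.mem_ofList _ _).mp hk)
  -- the tally read at each charMap item is the count of that item's card in the replaced hand
  have hf : ∀ kv ∈ pvCharMap.items,
      (hand.toList.foldl
        (fun (d : PySem.Dict String Int) c =>
          if c == 'J' then d
          else d.insert (pvCharMap.getD c "") (d.getD (pvCharMap.getD c "") 0 + 1))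
        (PySem.Dict.mk [])).getD kv.2 0
      = ((PySem.Str.replace hand "J" "").toList.count kv.1 : Int) := by
    intro kv hkv
    rw [pv_tally_getD]
    have hkkeys : kv.1 ∈ pvCharMap.keys := pv_items_key kv hkv
    -- counted via the translation = counted via the key, on a hand of charMap keys
    have hcountP : ((hand.toList.filter (fun c => !(c == 'J'))).map (fun c => pvCharMap.getD c "")).count kv.2
        = (hand.toList.filter (fun c => !(c == 'J'))).count kv.1 := by
      rw [List.count_eq_countP, List.countP_map]
      rw [List.count_eq_countP]
      apply List.countP_congr
      intro c hc
      have hckeys : c ∈ pvCharMap.keys :=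
        hhand c (List.mem_of_mem_filter hc)
      have hmi := pv_m_inj c hckeys kv.1 hkkeys
      show ((pvCharMap.getD c "") == kv.2) = true ↔ (c == kv.1) = true
      rw [pv_items_val kv hkv, show pvVal kv.1 = pvCharMap.getD kv.1 "" from rfl, hmi]
    rw [hcountP]
    by_cases hJ : kv.1 = 'J'
    · rw [hJ]
      rw [List.count_eq_zero.mpr (fun h => by simpa using (List.mem_filter.mp h).2),
          List.count_eq_zero.mpr (hJ ▸ hnoJ)]
    · rw [List.count_filter (by simp [hJ]), hrl, pv_count_replace hand.toList kv.1 hJ]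
  exact pv_main (PySem.Str.replace hand "J" "").toList
    (fun kv => (hand.toList.foldl
      (fun (d : PySem.Dict String Int) c =>
        if c == 'J' then d
        else d.insert (pvCharMap.getD c "") (d.getD (pvCharMap.getD c "") 0 + 1))
      (PySem.Dict.mk [])).getD kv.2 0) hkeys hf
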